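-- pv_equiv track=rewrite | github.com/vladimirth6/trenajer | validation.py | valid_password
-- ===== SOURCE A (Python) =====
-- def valid_password(password='',level='ful'):
--     v1='1234567890'
--     v2='QWERTYUIOPASDFGHJKLZXCVBNM'
--     v3='!@#$%^&*()_+= -{[}]|\?><.,;:\'\"'
--     if len(password)<8:
--         return "Пароль повинен мати не менше 8 символiв"
--     if len(password)>100:
--         return "Пароль занадто довгий"
--     if level=='light':
--         return None
--     f1=True
--     for i in v1:
--         if i in password:
--             f1=False
--     if f1:
--         return 'В пароле должна быть хоть одна цифра'
--     if level=='numeric':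
--         return None
--     f1=True
--     for i in v2:
--         if i in password:
--             f1=False
--     if f1:
--         return 'В пароле должна быть хоть одна заглавная буква'
--     if level=='hig_case':
--         return None
--     f1=True
--     for i in v3:
--         if i in password:
--             f1=False
--     if f1:
--         return 'В пароле должна быть хоть один спец символ'
--     return None #levl ful
-- ===== SOURCE B (Python) =====
-- def valid_password(password='', level='ful'):
--     # Single pass over the password computing the three class flags,
--     # then a plain guard chain in the original order with the original messages.
--     if len(password) < 8:
--         return "Пароль повинен мати не менше 8 символiв"
--     if len(password) > 100:
--         return "Пароль занадто довгий"
--     v1 = '1234567890'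
--     v2 = 'QWERTYUIOPASDFGHJKLZXCVBNM'
--     v3 = '!@#$%^&*()_+= -{[}]|\\?><.,;:\'"'
--     has_digit = has_upper = has_special = False
--     for c in password:
--         if c in v1:
--             has_digit = True
--         if c in v2:
--             has_upper = True
--         if c in v3:
--             has_special = True
--     if level == 'light':
--         return None
--     if not has_digit:
--         return 'В пароле должна быть хоть одна цифра'
--     if level == 'numeric':
--         return None
--     if not has_upper:
--         return 'В пароле должна быть хоть одна заглавная буква'
--     if level == 'hig_case':
--         return None
--     if not has_special:
--         return 'В пароле должна быть хоть один спец символ'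
--     return None
-- ===== Notes on version B (the rewrite author's own statement) =====
-- stated objective: alternative
-- what changed: A scans the whole password once per alphabet character (three loops over the alphabets with a substring test inside); B makes a single pass over the password computing the three class flags, then runs the same guard chain.
import Mathlib
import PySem

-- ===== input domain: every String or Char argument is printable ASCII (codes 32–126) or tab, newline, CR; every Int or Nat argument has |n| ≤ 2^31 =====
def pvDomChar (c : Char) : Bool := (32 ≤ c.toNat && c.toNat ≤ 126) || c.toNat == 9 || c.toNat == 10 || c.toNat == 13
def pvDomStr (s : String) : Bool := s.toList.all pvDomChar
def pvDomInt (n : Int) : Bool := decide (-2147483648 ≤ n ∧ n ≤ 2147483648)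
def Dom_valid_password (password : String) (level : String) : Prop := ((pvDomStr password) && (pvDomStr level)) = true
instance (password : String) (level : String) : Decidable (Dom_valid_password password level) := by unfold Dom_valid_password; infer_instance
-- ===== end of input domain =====

-- B replaces A's three passes over the alphabet strings by one pass over the password
-- computing the three class flags, followed by the same guard chain (objective: alternative).


-- ===== PORT A =====
-- 'i in password' for a one-character string i is exactly char membership in the password's chars.
def valid_password (password : String) (level : String) : Option String :=
  let v1 := "1234567890".toList
  let v2 := "QWERTYUIOPASDFGHJKLZXCVBNM".toList
  let v3 := "!@#$%^&*()_+= -{[}]|\\?><.,;:'\"".toList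
  let pw := password.toList
  if pw.length < 8 then some "Пароль повинен мати не менше 8 символiв"
  else if pw.length > 100 then some "Пароль занадто довгий"
  else if level = "light" then none
  else if v1.foldl (fun f1 i => if pw.contains i then false else f1) true then
    some "В пароле должна быть хоть одна цифра"
  else if level = "numeric" then none
  else if v2.foldl (fun f1 i => if pw.contains i then false else f1) true then
    some "В пароле должна быть хоть одна заглавная буква"
  else if level = "hig_case" then none
  else if v3.foldl (fun f1 i => if pw.contains i then false else f1) true then
    some "В пароле должна быть хоть один спец символ"
  else none

-- ===== PORT B =====
def valid_password_alt (password : String) (level : String) : Option String :=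
  let pw := password.toList
  if pw.length < 8 then some "Пароль повинен мати не менше 8 символiв"
  else if pw.length > 100 then some "Пароль занадто довгий"
  else
    let v1 := "1234567890".toList
    let v2 := "QWERTYUIOPASDFGHJKLZXCVBNM".toList
    let v3 := "!@#$%^&*()_+= -{[}]|\\?><.,;:'\"".toList
    -- single pass over the password: (has_digit, has_upper, has_special)
    let flags := pw.foldl (fun (acc : Bool × Bool × Bool) c =>
        (if v1.contains c then true else acc.1,
         if v2.contains c then true else acc.2.1,
         if v3.contains c then true else acc.2.2)) (false, false, false)
    if level = "light" then none
    else if !flags.1 then some "В пароле должна быть хоть одна цифра"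
    else if level = "numeric" then none
    else if !flags.2.1 then some "В пароле должна быть хоть одна заглавная буква"
    else if level = "hig_case" then none
    else if !flags.2.2 then some "В пароле должна быть хоть один спец символ"
    else none

-- ===== PRECONDITION & SPEC =====
def Spec_valid_password (password : String) (level : String) (out : Option String) : Prop := out = valid_password_alt password level
instance (password : String) (level : String) (out : Option String) : Decidable (Spec_valid_password password level out) := by unfold Spec_valid_password; infer_instance

-- ===== CLAIM (what is proved, stated in full; the proofs are below) =====
def Claim_equal_valid_password : Prop := ∀ (password : String) (level : String), Dom_valid_password password level → Spec_valid_password password level (valid_password password level)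

-- ===== LEMMAS AND PROOFS =====

-- A's per-alphabet flag loop computes "no alphabet char occurs in the password".
theorem flagA_eq (v pw : List Char) :
    v.foldl (fun f1 i => if pw.contains i then false else f1) true
      = !(v.any (fun i => pw.contains i)) := by
  simpa using PySem.List.foldl_if_false_eq (fun i => pw.contains i) (l := v) (b := true)

-- membership-any is symmetric between the two lists
theorem any_mem_comm (xs ys : List Char) :
    xs.any (fun x => ys.contains x) = ys.any (fun y => xs.contains y) := by
  rw [Bool.eq_iff_iff]
  simp only [List.any_eq_true, List.contains_iff_mem]
  exact ⟨fun ⟨x, h1, h2⟩ => ⟨x, h2, h1⟩, fun ⟨x, h1, h2⟩ => ⟨x, h2, h1⟩⟩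

-- B's single pass computes the three "some char of the class occurs" flags.
theorem flagsB_eq (v1 v2 v3 pw : List Char) (a b c : Bool) :
    pw.foldl (fun (acc : Bool × Bool × Bool) ch =>
        (if v1.contains ch then true else acc.1,
         if v2.contains ch then true else acc.2.1,
         if v3.contains ch then true else acc.2.2)) (a, b, c)
      = (a || pw.any (fun ch => v1.contains ch),
         b || pw.any (fun ch => v2.contains ch),
         c || pw.any (fun ch => v3.contains ch)) := by
  induction pw generalizing a b c with
  | nil => simp
  | cons ch rest ih =>
      simp only [List.foldl_cons, List.any_cons, ih]
      cases h1 : v1.contains ch <;> cases h2 : v2.contains ch <;> cases h3 : v3.contains ch <;> simp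

-- ===== VERDICT (by name: the statement is the Claim_ definition above) =====
theorem valid_password_spec : Claim_equal_valid_password := by
  intro password level _
  unfold Spec_valid_password valid_password valid_password_alt
  simp only [flagA_eq, flagsB_eq, Bool.false_or,
    any_mem_comm "1234567890".toList password.toList,
    any_mem_comm "QWERTYUIOPASDFGHJKLZXCVBNM".toList password.toList,
    any_mem_comm "!@#$%^&*()_+= -{[}]|\\?><.,;:'\"".toList password.toList]
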